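-- pv_equiv track=rewrite | github.com/cola1917/FIT5120_TM11 | nutri-health-api/scripts/clean_food_metadata.py | infer_health_level
-- ===== SOURCE A (Python) =====
-- def infer_health_level(
--     clean_name: str,
--     clean_category: str,
--     sub_category: str,
--     grade: str | None,
-- ) -> str:
--     """
--     Determine health_level: 'healthy' | 'sometimes' | 'try_less'.
--     Dairy sub-types get fine-grained rules based on fat content and sweetness.
--     Grade D/E → try_less for most non-core categories.
--     """
--     name = clean_name.lower()
--     grade_upper = (grade or "").upper()
--
--     # Universal try_less triggers from name
--     try_less_name = {
--         "soda", "soft drink", "candy", "cookie", "cake", "ice cream",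
--         "donut", "doughnut", "chips", "fries", "fried", "dessert",
--         "pastry", "syrup", "sweetened beverage", "energy drink",
--         "chocolate bar", "toffee", "caramel",
--     }
--     if any(kw in name for kw in try_less_name):
--         return "try_less"
--
--     # ── Dairy-specific rules ───────────────────────────────────────────
--     if clean_category == "dairy":
--         if sub_category == "butter_fat":
--             # Butter and butter oil are high in saturated fat
--             return "try_less"
--
--         if sub_category == "egg_drink":  # eggnog
--             if grade_upper in {"D", "E"}:
--                 return "try_less"
--             return "sometimes"   # festive, rich, high-calorie
--
--         if sub_category == "cream":
--             if grade_upper in {"D", "E"}: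
--                 return "try_less"
--             return "sometimes"
--
--         if sub_category == "cheese_spread":
--             if grade_upper in {"D", "E"}:
--                 return "try_less"
--             return "sometimes"
--
--         if sub_category == "cheese":
--             if grade_upper in {"D", "E"}:
--                 return "try_less"
--             # Low-fat/part-skim cheese with good grade → healthy
--             low_fat_markers = {"low-fat", "part-skim", "nonfat", "skim", "fat-free", "reduced-fat"}
--             if grade_upper in {"A", "B"} and any(m in name for m in low_fat_markers):
--                 return "healthy"
--             if grade_upper in {"A", "B"}:
--                 return "sometimes"
--             return "sometimes"
--
--         if sub_category == "flavored_milk":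
--             if grade_upper in {"D", "E"}:
--                 return "try_less"
--             # Reduced-sugar flavored milk is better than regular
--             if "reduced-sugar" in name or "no-sugar-added" in name:
--                 return "sometimes"
--             return "sometimes"
--
--         if sub_category in {"plain_milk", "yogurt"}:
--             if grade_upper in {"D", "E"}:
--                 return "sometimes"
--             if grade_upper in {"A", "B"}:
--                 return "healthy"
--             if grade_upper == "C":
--                 return "sometimes"
--             return "healthy"
--
--         # Default dairy fallback
--         if grade_upper in {"D", "E"}:
--             return "try_less"
--         if grade_upper in {"A", "B"}:
--             return "healthy"
--         return "sometimes"
--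
--     # ── Non-dairy ──────────────────────────────────────────────────────
--     if grade_upper in {"D", "E"}:
--         return "try_less"
--
--     core_categories = {
--         "meat", "fish", "vegetables", "fruits", "rice", "noodles",
--         "grains", "beans", "eggs",
--     }
--     if grade_upper in {"A", "B"} and clean_category in core_categories:
--         return "healthy"
--     if grade_upper == "C":
--         return "sometimes"
--     if grade_upper in {"A", "B"}:
--         return "sometimes"
--
--     # Fallback by category
--     if clean_category in core_categories:
--         return "healthy"
--     return "sometimes"
-- ===== SOURCE B (Python) =====
-- TRY_LESS_KW = (
--     "soda", "soft drink", "candy", "cookie", "cake", "ice cream",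
--     "donut", "doughnut", "chips", "fries", "fried", "dessert",
--     "pastry", "syrup", "sweetened beverage", "energy drink",
--     "chocolate bar", "toffee", "caramel",
-- )
-- LOW_FAT = ("low-fat", "part-skim", "nonfat", "skim", "fat-free", "reduced-fat")
-- CORE = ("meat", "fish", "vegetables", "fruits", "rice", "noodles",
--         "grains", "beans", "eggs")
--
-- # Declarative rule table: each rule maps feature name -> set of allowed values;
-- # the first rule whose every constraint is satisfied gives the answer.
-- RULES = [
--     ({"kw": {True}}, "try_less"),
--     ({"dairy": {True}, "sub": {"butter_fat"}}, "try_less"),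
--     ({"dairy": {True}, "sub": {"plain_milk", "yogurt"}, "band": {"DE", "C"}}, "sometimes"),
--     ({"dairy": {True}, "sub": {"plain_milk", "yogurt"}}, "healthy"),
--     ({"dairy": {True}, "band": {"DE"}}, "try_less"),
--     ({"dairy": {True}, "sub": {"cheese"}, "band": {"AB"}, "lowfat": {True}}, "healthy"),
--     ({"dairy": {True},
--       "sub": {"egg_drink", "cream", "cheese_spread", "flavored_milk", "cheese"}}, "sometimes"),
--     ({"dairy": {True}, "band": {"AB"}}, "healthy"),
--     ({"dairy": {True}}, "sometimes"),
--     ({"band": {"DE"}}, "try_less"),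
--     ({"band": {"AB"}, "core": {True}}, "healthy"),
--     ({"band": {"C"}}, "sometimes"),
--     ({"band": {"AB"}}, "sometimes"),
--     ({"core": {True}}, "healthy"),
--     ({}, "sometimes"),
-- ]
--
--
-- def infer_health_level(clean_name, clean_category, sub_category, grade):
--     name = clean_name.lower()
--     g = (grade or "").upper()
--     feats = {
--         "kw": any(k in name for k in TRY_LESS_KW),
--         "dairy": clean_category == "dairy",
--         "sub": sub_category,
--         "band": ("DE" if g in ("D", "E") else
--                  "AB" if g in ("A", "B") else
--                  "C" if g == "C" else ""),
--         "lowfat": any(m in name for m in LOW_FAT),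
--         "core": clean_category in CORE,
--     }
--     for constraints, result in RULES:
--         if all(feats[f] in allowed for f, allowed in constraints.items()):
--             return result
--     return "sometimes"
-- ===== Notes on version B (the rewrite author's own statement) =====
-- stated objective: alternative
-- what changed: Replaces A's hard-coded nested if/elif cascade by a data-driven rule engine: features (keyword hit, dairy, sub-category, grade band, low-fat marker, core category) are extracted once and a declarative first-match rule table is scanned generically.
import Mathlib
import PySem

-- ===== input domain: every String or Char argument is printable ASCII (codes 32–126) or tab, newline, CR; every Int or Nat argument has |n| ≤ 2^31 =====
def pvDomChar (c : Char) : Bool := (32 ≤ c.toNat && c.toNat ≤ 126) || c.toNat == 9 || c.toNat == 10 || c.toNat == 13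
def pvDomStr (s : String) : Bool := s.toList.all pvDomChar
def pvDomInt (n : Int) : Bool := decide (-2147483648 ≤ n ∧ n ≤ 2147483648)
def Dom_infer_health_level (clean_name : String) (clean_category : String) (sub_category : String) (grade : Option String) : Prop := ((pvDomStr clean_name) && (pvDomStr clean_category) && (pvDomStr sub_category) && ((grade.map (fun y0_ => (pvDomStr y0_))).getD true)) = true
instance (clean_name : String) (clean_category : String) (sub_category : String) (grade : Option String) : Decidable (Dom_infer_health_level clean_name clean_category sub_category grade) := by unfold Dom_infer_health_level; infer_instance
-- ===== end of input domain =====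

-- B replaces A's nested if/elif cascade by a data-driven rule engine (feature record +
-- first-match scan of a declarative rule table); objective: alternative, equal on the whole domain.

-- ===== PORT A =====
def tryLessNameA : List String := ["soda", "soft drink", "candy", "cookie", "cake", "ice cream",
  "donut", "doughnut", "chips", "fries", "fried", "dessert",
  "pastry", "syrup", "sweetened beverage", "energy drink",
  "chocolate bar", "toffee", "caramel"]

def lowFatMarkersA : List String := ["low-fat", "part-skim", "nonfat", "skim", "fat-free", "reduced-fat"]

def coreCategoriesA : List String := ["meat", "fish", "vegetables", "fruits", "rice", "noodles",
  "grains", "beans", "eggs"]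

def infer_health_level (clean_name : String) (clean_category : String) (sub_category : String) (grade : Option String) : String :=
  let name := PySem.Str.lower clean_name
  let grade_upper := PySem.Str.upper (grade.getD "")
  if tryLessNameA.any (fun kw => PySem.Str.isIn kw name) then "try_less"
  else if clean_category == "dairy" then
    if sub_category == "butter_fat" then "try_less"
    else if sub_category == "egg_drink" then
      if ["D", "E"].contains grade_upper then "try_less" else "sometimes"
    else if sub_category == "cream" then
      if ["D", "E"].contains grade_upper then "try_less" else "sometimes"
    else if sub_category == "cheese_spread" then
      if ["D", "E"].contains grade_upper then "try_less" else "sometimes"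
    else if sub_category == "cheese" then
      if ["D", "E"].contains grade_upper then "try_less"
      else if ["A", "B"].contains grade_upper && lowFatMarkersA.any (fun m => PySem.Str.isIn m name) then "healthy"
      else if ["A", "B"].contains grade_upper then "sometimes"
      else "sometimes"
    else if sub_category == "flavored_milk" then
      if ["D", "E"].contains grade_upper then "try_less"
      else if PySem.Str.isIn "reduced-sugar" name || PySem.Str.isIn "no-sugar-added" name then "sometimes"
      else "sometimes"
    else if ["plain_milk", "yogurt"].contains sub_category then
      if ["D", "E"].contains grade_upper then "sometimes"
      else if ["A", "B"].contains grade_upper then "healthy"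
      else if grade_upper == "C" then "sometimes"
      else "healthy"
    else
      if ["D", "E"].contains grade_upper then "try_less"
      else if ["A", "B"].contains grade_upper then "healthy"
      else "sometimes"
  else
    if ["D", "E"].contains grade_upper then "try_less"
    else if ["A", "B"].contains grade_upper && coreCategoriesA.contains clean_category then "healthy"
    else if grade_upper == "C" then "sometimes"
    else if ["A", "B"].contains grade_upper then "sometimes"
    else if coreCategoriesA.contains clean_category then "healthy"
    else "sometimes"

-- ===== PORT B =====
def tryLessKwB : List String := ["soda", "soft drink", "candy", "cookie", "cake", "ice cream",
  "donut", "doughnut", "chips", "fries", "fried", "dessert",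
  "pastry", "syrup", "sweetened beverage", "energy drink",
  "chocolate bar", "toffee", "caramel"]

def lowFatB : List String := ["low-fat", "part-skim", "nonfat", "skim", "fat-free", "reduced-fat"]

def coreB : List String := ["meat", "fish", "vegetables", "fruits", "rice", "noodles",
  "grains", "beans", "eggs"]

-- the feature record Source B's `feats` dict builds
structure Feats where
  kw : Bool
  dairy : Bool
  sub : String
  band : String
  lowfat : Bool
  core : Bool

-- one constraint of a rule: feature name with its set of allowed values
inductive Cond where
  | kw (allowed : List Bool)
  | dairy (allowed : List Bool)
  | sub (allowed : List String)
  | band (allowed : List String)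
  | lowfat (allowed : List Bool)
  | core (allowed : List Bool)

def evalCond (f : Feats) : Cond → Bool
  | .kw a => a.contains f.kw
  | .dairy a => a.contains f.dairy
  | .sub a => a.contains f.sub
  | .band a => a.contains f.band
  | .lowfat a => a.contains f.lowfat
  | .core a => a.contains f.core

def rulesB : List (List Cond × String) :=
  [ ([.kw [true]], "try_less"),
    ([.dairy [true], .sub ["butter_fat"]], "try_less"),
    ([.dairy [true], .sub ["plain_milk", "yogurt"], .band ["DE", "C"]], "sometimes"),
    ([.dairy [true], .sub ["plain_milk", "yogurt"]], "healthy"),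
    ([.dairy [true], .band ["DE"]], "try_less"),
    ([.dairy [true], .sub ["cheese"], .band ["AB"], .lowfat [true]], "healthy"),
    ([.dairy [true], .sub ["egg_drink", "cream", "cheese_spread", "flavored_milk", "cheese"]], "sometimes"),
    ([.dairy [true], .band ["AB"]], "healthy"),
    ([.dairy [true]], "sometimes"),
    ([.band ["DE"]], "try_less"),
    ([.band ["AB"], .core [true]], "healthy"),
    ([.band ["C"]], "sometimes"),
    ([.band ["AB"]], "sometimes"),
    ([.core [true]], "healthy"),
    ([], "sometimes") ]

def firstMatch (f : Feats) : List (List Cond × String) → String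
  | [] => "sometimes"
  | (cs, r) :: rest => if cs.all (evalCond f) then r else firstMatch f rest

def infer_health_level_alt (clean_name : String) (clean_category : String) (sub_category : String) (grade : Option String) : String :=
  let name := PySem.Str.lower clean_name
  let g := PySem.Str.upper (grade.getD "")
  let feats : Feats :=
    { kw := tryLessKwB.any (fun k => PySem.Str.isIn k name)
      dairy := clean_category == "dairy"
      sub := sub_category
      band := if ["D", "E"].contains g then "DE"
              else if ["A", "B"].contains g then "AB"
              else if g == "C" then "C" else ""
      lowfat := lowFatB.any (fun m => PySem.Str.isIn m name)
      core := coreB.contains clean_category }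
  firstMatch feats rulesB

-- ===== PRECONDITION & SPEC =====
def Spec_infer_health_level (clean_name : String) (clean_category : String) (sub_category : String) (grade : Option String) (out : String) : Prop := out = infer_health_level_alt clean_name clean_category sub_category grade
instance (clean_name : String) (clean_category : String) (sub_category : String) (grade : Option String) (out : String) : Decidable (Spec_infer_health_level clean_name clean_category sub_category grade out) := by unfold Spec_infer_health_level; infer_instance

-- ===== CLAIM =====
def Claim_equal_infer_health_level : Prop := ∀ (clean_name : String) (clean_category : String) (sub_category : String) (grade : Option String), Dom_infer_health_level clean_name clean_category sub_category grade → Spec_infer_health_level clean_name clean_category sub_category grade (infer_health_level clean_name clean_category sub_category grade)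

-- ===== LEMMAS AND PROOFS =====
theorem infer_health_level_eq_alt (clean_name clean_category sub_category : String) (grade : Option String) :
    infer_health_level clean_name clean_category sub_category grade
      = infer_health_level_alt clean_name clean_category sub_category grade := by
  simp only [infer_health_level, infer_health_level_alt, rulesB, firstMatch, evalCond,
    show tryLessKwB = tryLessNameA from rfl, show lowFatB = lowFatMarkersA from rfl,
    show coreB = coreCategoriesA from rfl]
  generalize PySem.Str.upper (grade.getD "") = G
  generalize (tryLessNameA.any fun kw => PySem.Str.isIn kw (PySem.Str.lower clean_name)) = K
  generalize (lowFatMarkersA.any fun m => PySem.Str.isIn m (PySem.Str.lower clean_name)) = L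
  generalize (PySem.Str.isIn "reduced-sugar" (PySem.Str.lower clean_name)
      || PySem.Str.isIn "no-sugar-added" (PySem.Str.lower clean_name)) = R
  generalize (["D", "E"].contains G) = DE
  generalize (["A", "B"].contains G) = AB
  generalize (G == "C") = C
  generalize (clean_category == "dairy") = dairy
  generalize (coreCategoriesA.contains clean_category) = core
  by_cases h1 : sub_category = "butter_fat"
  · subst h1; revert K L R DE AB C dairy core; decide
  by_cases h2 : sub_category = "egg_drink"
  · subst h2; revert K L R DE AB C dairy core; decide
  by_cases h3 : sub_category = "cream"
  · subst h3; revert K L R DE AB C dairy core; decide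
  by_cases h4 : sub_category = "cheese_spread"
  · subst h4; revert K L R DE AB C dairy core; decide
  by_cases h5 : sub_category = "cheese"
  · subst h5; revert K L R DE AB C dairy core; decide
  by_cases h6 : sub_category = "flavored_milk"
  · subst h6; revert K L R DE AB C dairy core; decide
  by_cases h7 : sub_category = "plain_milk"
  · subst h7; revert K L R DE AB C dairy core; decide
  by_cases h8 : sub_category = "yogurt"
  · subst h8; revert K L R DE AB C dairy core; decide
  have e : ∀ t : String, sub_category ≠ t → (sub_category == t) = false :=
    fun t h => beq_eq_false_iff_ne.mpr h
  have e' : ∀ t : String, sub_category ≠ t → (t == sub_category) = false :=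
    fun t h => beq_eq_false_iff_ne.mpr (Ne.symm h)
  simp only [List.all_cons, List.all_nil, evalCond, List.contains_cons, List.contains_nil,
    e _ h1, e _ h2, e _ h3, e _ h4, e _ h5, e _ h6, e _ h7, e _ h8,
    e' _ h1, e' _ h2, e' _ h3, e' _ h4, e' _ h5, e' _ h6, e' _ h7, e' _ h8,
    Bool.or_false, Bool.false_or, Bool.and_true, Bool.true_and, Bool.false_and, Bool.and_false,
    Bool.false_eq_true, if_false]
  revert K L R DE AB C dairy core; decide

-- ===== VERDICT =====
theorem infer_health_level_spec : Claim_equal_infer_health_level := by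
  intro clean_name clean_category sub_category grade _
  exact infer_health_level_eq_alt clean_name clean_category sub_category grade
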